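-- pv_equiv track=rewrite | github.com/yoganathanAnanthan/rp_backend_to_deploy | v1/Controllers/ShortNoteContoller.py | remove_duplicate_sentences
-- ===== SOURCE A (Python) =====
-- def remove_duplicate_sentences(text, min_appearances=2):
--     sentences = text.split(". ")
--     sentence_frequencies = {}
--     to_remove = set()
--
--     for i, sentence in enumerate(sentences):
--         if sentence in sentence_frequencies:
--             sentence_frequencies[sentence] += 1
--         else:
--             sentence_frequencies[sentence] = 1
--
--         if sentence_frequencies[sentence] >= min_appearances:
--             to_remove.add(i)
--
--     return ". ".join(
--         [sentences[i] for i in range(len(sentences)) if i not in to_remove]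
--     )
-- ===== SOURCE B (Python) =====
-- def remove_duplicate_sentences(text, min_appearances=2):
--     kept = []
--     counts = {}
--     for sentence in text.split(". "):
--         counts[sentence] = counts.get(sentence, 0) + 1
--         if counts[sentence] < min_appearances:
--             kept.append(sentence)
--     return ". ".join(kept)
-- ===== Notes on version B (the rewrite author's own statement) =====
-- stated objective: simpler
-- what changed: Single pass that appends each sentence directly to the result list while its running count stays below the threshold, eliminating A's to_remove index set, the enumerate indices and the separate range/index-filtering comprehension.
import Mathlib
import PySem

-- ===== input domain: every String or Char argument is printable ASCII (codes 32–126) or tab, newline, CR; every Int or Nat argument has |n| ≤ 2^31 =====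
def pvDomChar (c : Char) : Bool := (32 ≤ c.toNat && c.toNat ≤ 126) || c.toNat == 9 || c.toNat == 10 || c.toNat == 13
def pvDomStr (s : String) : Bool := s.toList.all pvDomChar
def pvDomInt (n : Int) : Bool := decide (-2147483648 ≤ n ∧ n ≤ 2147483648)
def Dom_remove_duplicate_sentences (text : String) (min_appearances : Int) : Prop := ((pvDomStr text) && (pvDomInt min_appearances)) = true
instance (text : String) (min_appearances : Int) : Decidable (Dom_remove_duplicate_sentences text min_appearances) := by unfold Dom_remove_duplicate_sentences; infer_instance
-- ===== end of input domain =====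

-- ===== PORT A =====
-- B does one pass appending each sentence while its running count is below the threshold,
-- dropping A's to_remove index set and the index-filtering comprehension (objective: simpler).

-- loop body of A's 'for i, sentence in enumerate(sentences): …'
def pvStepA (m : Int) (st : PySem.Dict String Int × PySem.Set Int) (p : Int × String) :
    PySem.Dict String Int × PySem.Set Int :=
  let d := if st.1.contains p.2 then st.1.insert p.2 (st.1.getD p.2 0 + 1) else st.1.insert p.2 1
  let rem := if m ≤ d.getD p.2 0 then PySem.Set.add st.2 p.1 else st.2
  (d, rem)

def remove_duplicate_sentences (text : String) (min_appearances : Int) : String :=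
  -- split? is 'some' here since the separator ". " is nonempty
  let sentences := (PySem.Str.split? text ". ").getD []
  let st := (PySem.List.enumerate sentences).foldl (pvStepA min_appearances)
    (PySem.Dict.empty, PySem.Set.empty)
  PySem.Str.join ". "
    (((PySem.List.pyRange 0 (PySem.List.len sentences)).filter
        (fun i => !(PySem.Set.contains st.2 i))).map
      (fun i => PySem.List.pyGetD sentences i ""))

-- ===== PORT B =====
-- loop body of B's 'for sentence in text.split(". "): …'
def pvStepB (m : Int) (st : List String × PySem.Dict String Int) (s : String) :
    List String × PySem.Dict String Int :=
  let counts := st.2.insert s (st.2.getD s 0 + 1)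
  (if counts.getD s 0 < m then st.1 ++ [s] else st.1, counts)

def remove_duplicate_sentences_alt (text : String) (min_appearances : Int) : String :=
  let st := ((PySem.Str.split? text ". ").getD []).foldl (pvStepB min_appearances)
    ([], PySem.Dict.empty)
  PySem.Str.join ". " st.1

-- ===== PRECONDITION & SPEC =====
def Spec_remove_duplicate_sentences (text : String) (min_appearances : Int) (out : String) : Prop := out = remove_duplicate_sentences_alt text min_appearances
instance (text : String) (min_appearances : Int) (out : String) : Decidable (Spec_remove_duplicate_sentences text min_appearances out) := by unfold Spec_remove_duplicate_sentences; infer_instance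

-- ===== CLAIM (what is proved, stated in full; the proofs are below) =====
def Claim_equal_remove_duplicate_sentences : Prop := ∀ (text : String) (min_appearances : Int), Dom_remove_duplicate_sentences text min_appearances → Spec_remove_duplicate_sentences text min_appearances (remove_duplicate_sentences text min_appearances)

-- ===== LEMMAS AND PROOFS =====

-- reference: the sentences kept, recursively over the list, threading the count dict
def pvKeep (m : Int) : List String → PySem.Dict String Int → List String
  | [], _ => []
  | s :: t, d =>
    (if d.getD s 0 + 1 < m then [s] else []) ++ pvKeep m t (d.insert s (d.getD s 0 + 1))

-- A's branching dict update collapses to a single insert, and the freshly stored count is getD+1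
theorem pvStepA_eq (m : Int) (st : PySem.Dict String Int × PySem.Set Int) (p : Int × String) :
    pvStepA m st p =
      (st.1.insert p.2 (st.1.getD p.2 0 + 1),
       if m ≤ st.1.getD p.2 0 + 1 then PySem.Set.add st.2 p.1 else st.2) := by
  unfold pvStepA
  by_cases h : st.1.contains p.2 = true
  · simp [h, PySem.Dict.getD_insert_self]
  · have h0 : st.1.getD p.2 0 = 0 :=
      PySem.Dict.getD_of_not_contains st.1 0 (by simpa using h)
    simp [h, h0, PySem.Dict.getD_insert_self]

-- old removal indices survive the fold (the step only adds)
theorem pvRem_mono (m : Int) (ps : List (Int × String)) :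
    ∀ (d : PySem.Dict String Int) (rem : PySem.Set Int) (x : Int), x ∈ rem →
      x ∈ (ps.foldl (pvStepA m) (d, rem)).2 := by
  induction ps with
  | nil => intro d rem x hx; simpa using hx
  | cons p t ih =>
    intro d rem x hx
    rw [List.foldl_cons, pvStepA_eq]
    apply ih
    by_cases h : m ≤ d.getD p.2 0 + 1 <;>
      simp [h, PySem.Set.mem_add, hx]

-- every index added while folding over 'enumerate l i0' is ≥ i0
theorem pvRem_bound (m : Int) (l : List String) :
    ∀ (i0 : Int) (d : PySem.Dict String Int) (rem : PySem.Set Int) (x : Int),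
      x ∈ ((PySem.List.enumerate l i0).foldl (pvStepA m) (d, rem)).2 →
      x ∈ rem ∨ i0 ≤ x := by
  induction l with
  | nil => intro i0 d rem x hx; left; simpa [PySem.List.enumerate_nil] using hx
  | cons s t ih =>
    intro i0 d rem x hx
    rw [PySem.List.enumerate_cons, List.foldl_cons, pvStepA_eq] at hx
    rcases ih (i0 + 1) _ _ x hx with h | h
    · by_cases hc : m ≤ d.getD s 0 + 1
      · simp only [hc, if_pos] at h
        rcases (PySem.Set.mem_add _ _ _).1 h with h' | h'
        · exact Or.inl h'
        · right; omega
      · simp only [hc, if_neg, not_false_iff] at h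
        exact Or.inl (by simpa using h)
    · right; omega

-- peeling the head off the index filter
theorem pvFilter_head (R : PySem.Set Int) (i0 : Int) (s : String) (rest : List (Int × String)) :
    List.filter (fun p : Int × String => !(PySem.Set.contains R p.1)) ((i0, s) :: rest)
      = (if PySem.Set.contains R i0 then [] else [(i0, s)])
        ++ List.filter (fun p : Int × String => !(PySem.Set.contains R p.1)) rest := by
  by_cases h : i0 ∈ R <;> simp [h]

-- main invariant: filtering 'enumerate l i0' by the final removal set yields pvKeep,
-- provided rem holds only indices < i0
theorem pvA_main (m : Int) (l : List String) :
    ∀ (i0 : Int) (d : PySem.Dict String Int) (rem : PySem.Set Int),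
      (∀ j ∈ rem, j < i0) →
      (((PySem.List.enumerate l i0).filter
          (fun p => !(PySem.Set.contains
            ((PySem.List.enumerate l i0).foldl (pvStepA m) (d, rem)).2 p.1))).map (·.2))
        = pvKeep m l d := by
  induction l with
  | nil => intro i0 d rem _; simp [PySem.List.enumerate_nil, pvKeep]
  | cons s t ih =>
    intro i0 d rem hrem
    rw [PySem.List.enumerate_cons, List.foldl_cons, pvStepA_eq]
    set rem1 := if m ≤ d.getD s 0 + 1 then PySem.Set.add rem i0 else rem with hrem1
    set d1 := d.insert s (d.getD s 0 + 1) with hd1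
    set R := ((PySem.List.enumerate t (i0 + 1)).foldl (pvStepA m) (d1, rem1)).2 with hR
    have hhead : PySem.Set.contains R i0 = decide (m ≤ d.getD s 0 + 1) := by
      by_cases hc : m ≤ d.getD s 0 + 1
      · simp only [hc, decide_true]
        have : i0 ∈ rem1 := by simp [hrem1, hc, PySem.Set.mem_add]
        simpa [PySem.Set.contains_iff] using pvRem_mono m _ _ _ _ this
      · simp only [hc, decide_false]
        rw [Bool.eq_false_iff]
        intro hcon
        have hx := (PySem.Set.contains_iff _ _).1 hcon
        rcases pvRem_bound m t (i0 + 1) d1 rem1 i0 hx with h | h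
        · have : i0 ∈ rem := by simpa [hrem1, hc] using h
          exact absurd (hrem _ this) (by omega)
        · omega
    have hrem1' : ∀ j ∈ rem1, j < i0 + 1 := by
      intro j hj
      by_cases hc : m ≤ d.getD s 0 + 1
      · have hj' : j ∈ rem ∨ j = i0 := by
          simpa [hrem1, hc, PySem.Set.mem_add] using hj
        rcases hj' with h | h
        · have := hrem _ h; omega
        · omega
      · have hj' : j ∈ rem := by simpa [hrem1, hc] using hj
        have := hrem _ hj'; omega
    rw [pvFilter_head, hhead, List.map_append, ih (i0 + 1) d1 rem1 hrem1']
    by_cases hc : m ≤ d.getD s 0 + 1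
    · simp [pvKeep, hc, hd1, show ¬ (d.getD s 0 + 1 < m) by omega]
    · simp [pvKeep, hc, hd1, show d.getD s 0 + 1 < m by omega]

-- B's fold accumulates exactly pvKeep
theorem pvB_loop (m : Int) (l : List String) :
    ∀ (acc : List String) (d : PySem.Dict String Int),
      (l.foldl (pvStepB m) (acc, d)).1 = acc ++ pvKeep m l d := by
  induction l with
  | nil => intro acc d; simp [pvKeep]
  | cons s t ih =>
    intro acc d
    rw [List.foldl_cons]
    have hstep : pvStepB m (acc, d) s
        = (if d.getD s 0 + 1 < m then acc ++ [s] else acc, d.insert s (d.getD s 0 + 1)) := by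
      simp [pvStepB, PySem.Dict.getD_insert_self]
    rw [hstep]
    by_cases hc : d.getD s 0 + 1 < m
    · rw [if_pos hc, ih]
      simp [pvKeep, hc]
    · rw [if_neg hc, ih]
      simp [pvKeep, hc]

-- A's comprehension over range-with-indexing is the filtered enumerate
theorem pvBridge (xs : List String) (R : PySem.Set Int) :
    ((PySem.List.pyRange 0 (PySem.List.len xs)).filter
        (fun i => !(PySem.Set.contains R i))).map (fun i => PySem.List.pyGetD xs i "")
      = ((PySem.List.enumerate xs).filter
          (fun p => !(PySem.Set.contains R p.1))).map (·.2) := by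
  rw [PySem.List.enumerate_eq_map_pyRange xs "", List.filter_map, List.map_map]
  rfl

-- ===== VERDICT (by name: the statement is the Claim_ definition above) =====
theorem remove_duplicate_sentences_spec : Claim_equal_remove_duplicate_sentences := by
  intro text m _
  unfold Spec_remove_duplicate_sentences remove_duplicate_sentences remove_duplicate_sentences_alt
  set xs := (PySem.Str.split? text ". ").getD [] with hxs
  simp only
  congr 1
  rw [pvBridge, pvA_main m xs 0 PySem.Dict.empty PySem.Set.empty
      (by intro j hj; simp [PySem.Set.empty] at hj),
    pvB_loop m xs [] PySem.Dict.empty, List.nil_append]
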